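-- pv_equiv track=rewrite | github.com/jharvey-records/fce-custom-pii-flagger | pii_detector.py | trim_test_lines
-- ===== SOURCE A (Python) =====
-- def trim_test_lines(script_content: str) -> str:
--     """
--     Trim test lines from painless script content based on comment markers.
--
--     Removes:
--     - Everything from start up to and including "// Anything on this line or above will be removed"
--     - Everything from "// Return statement goes here..." to the end
--
--     Args:
--         script_content: Raw script content from file
--
--     Returns:
--         Trimmed script content with only core algorithm logic
--     """
--     lines = script_content.split('\n')
--
--     # Find the start marker (remove everything up to and including this line)
--     start_marker = "// Anything on this line or above will be removed"
--     start_index = None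
--     for i, line in enumerate(lines):
--         if start_marker in line:
--             start_index = i + 1  # Start after this line
--             break
--
--     # Find the end marker (remove everything from this line onwards)
--     end_marker = "// Return statement goes here so you can validate if passChecksum is working in your lab"
--     end_index = None
--     for i, line in enumerate(lines):
--         if end_marker in line:
--             end_index = i  # End before this line
--             break
--
--     # Extract the core algorithm logic
--     if start_index is not None and end_index is not None:
--         # Both markers found - extract content between them
--         core_lines = lines[start_index:end_index]
--     elif start_index is not None:
--         # Only start marker found - extract everything after it
--         core_lines = lines[start_index:]
--     elif end_index is not None:
--         # Only end marker found - extract everything before it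
--         core_lines = lines[:end_index]
--     else:
--         # No markers found - return original content (no test lines)
--         core_lines = lines
--
--     return '\n'.join(core_lines)
-- ===== SOURCE B (Python) =====
-- def trim_test_lines(script_content: str) -> str:
--     """Offset-based variant: never splits into lines; computes the two cut
--     offsets directly on the raw string with find/rfind and returns one slice."""
--     start_marker = "// Anything on this line or above will be removed"
--     end_marker = "// Return statement goes here so you can validate if passChecksum is working in your lab"
--     s = 0
--     p = script_content.find(start_marker)
--     if p != -1:
--         nl = script_content.find('\n', p)
--         s = nl + 1 if nl != -1 else len(script_content)
--     e = len(script_content)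
--     q = script_content.find(end_marker)
--     if q != -1:
--         e = max(script_content.rfind('\n', 0, q), 0)
--     return script_content[s:e]
-- ===== Notes on version B (the rewrite author's own statement) =====
-- stated objective: alternative
-- what changed: Drops A's split-into-lines list, index scans and four-way list slicing entirely: B computes two character offsets directly on the raw string (str.find for each marker, a forward newline search for the end of the start-marker line, a backward bounded newline search for the newline before the end-marker line) and returns a single substring slice.
import Mathlib
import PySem

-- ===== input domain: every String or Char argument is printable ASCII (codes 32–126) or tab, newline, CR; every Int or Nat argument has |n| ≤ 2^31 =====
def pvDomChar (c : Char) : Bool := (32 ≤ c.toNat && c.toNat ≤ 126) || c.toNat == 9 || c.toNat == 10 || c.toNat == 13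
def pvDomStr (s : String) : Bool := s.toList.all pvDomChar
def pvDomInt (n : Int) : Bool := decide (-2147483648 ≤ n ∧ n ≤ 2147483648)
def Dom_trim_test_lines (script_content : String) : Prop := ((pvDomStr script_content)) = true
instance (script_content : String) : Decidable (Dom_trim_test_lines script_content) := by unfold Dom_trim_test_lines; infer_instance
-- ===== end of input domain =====

-- B drops A's line list and slicing entirely: it computes the two cut offsets directly on
-- the raw string with find/rfind and returns one substring slice (alternative; same cost).

def pvStartMarker : String := "// Anything on this line or above will be removed"
def pvEndMarker : String := "// Return statement goes here so you can validate if passChecksum is working in your lab"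

-- ===== PORT A =====
-- A's 'for i, line in enumerate(lines): if marker in line: …; break' loop (one per marker):
-- returns the first index (counting from i) of a line containing m, or none.
def pvFindMarker (m : String) : List (List Char) → Nat → Option Nat
  | [], _ => none
  | l :: rest, i => if PySem.Chars.isIn m.toList l then some i else pvFindMarker m rest (i + 1)

def trim_test_lines (script_content : String) : String :=
  let lines := PySem.Chars.splitOn script_content.toList "\n".toList
  let start_index : Option Nat :=
    match pvFindMarker pvStartMarker lines 0 with
    | some i => some (i + 1)
    | none => none
  let end_index : Option Nat := pvFindMarker pvEndMarker lines 0
  let core_lines :=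
    match start_index, end_index with
    | some a, some b => PySem.List.slice lines (some (a : Int)) (some (b : Int))
    | some a, none => PySem.List.slice lines (some (a : Int)) none
    | none, some b => PySem.List.slice lines none (some (b : Int))
    | none, none => lines
  String.ofList (PySem.Chars.join "\n".toList core_lines)

-- ===== PORT B =====
-- B's offset computation: find each marker, then locate the enclosing line's boundary
-- newlines with find('\n', p) / rfind('\n', 0, q), and return one slice of the raw string.
def trim_test_lines_alt (script_content : String) : String :=
  let cs := script_content.toList
  let p := PySem.Chars.find cs pvStartMarker.toList
  let s : Int :=
    if p != -1 then
      let nl := PySem.Chars.findFrom cs ['\n'] p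
      if nl != -1 then nl + 1 else (cs.length : Int)
    else 0
  let q := PySem.Chars.find cs pvEndMarker.toList
  let e : Int :=
    if q != -1 then max (PySem.Chars.rfindFrom cs ['\n'] 0 (some q)) 0
    else (cs.length : Int)
  String.ofList (PySem.List.slice cs (some s) (some e))

-- ===== PRECONDITION & SPEC =====
def Spec_trim_test_lines (script_content : String) (out : String) : Prop := out = trim_test_lines_alt script_content
instance (script_content : String) (out : String) : Decidable (Spec_trim_test_lines script_content out) := by unfold Spec_trim_test_lines; infer_instance

-- ===== CLAIM (what is proved, stated in full; the proofs are below) =====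
def Claim_equal_trim_test_lines : Prop := ∀ (script_content : String), Dom_trim_test_lines script_content → Spec_trim_test_lines script_content (trim_test_lines script_content)

-- ===== LEMMAS AND PROOFS =====

-- ---- intercalate step lemmas ----
lemma pvInterc_nil (c : Char) : List.intercalate [c] ([] : List (List Char)) = [] := by
  simp [List.intercalate]

lemma pvInterc_singleton (c : Char) (w : List Char) : List.intercalate [c] [w] = w := by
  simp [List.intercalate]

lemma pvInterc_cons (c : Char) (w : List Char) (t : List (List Char)) (h : t ≠ []) :
    List.intercalate [c] (w :: t) = w ++ c :: List.intercalate [c] t := by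
  cases t with
  | nil => cases h rfl
  | cons b u => simpa [PySem.Chars.join] using PySem.Chars.join_cons_cons [c] w b u

-- ---- splitting into lines: a plain structural model of str.split('\n') ----
def pvSplit (c : Char) : List Char → List (List Char)
  | [] => [[]]
  | x :: xs => if x = c then [] :: pvSplit c xs else (pvSplit c xs).modifyHead (x :: ·)

lemma pvSplit_ne_nil (c : Char) (s : List Char) : pvSplit c s ≠ [] := by
  induction s with
  | nil => simp [pvSplit]
  | cons x xs ih =>
    by_cases h : x = c
    · simp [pvSplit, h]
    · simp only [pvSplit, if_neg h]
      cases heq : pvSplit c xs with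
      | nil => exact absurd heq ih
      | cons a t => simp

lemma pvSplit_sep_not_mem (c : Char) (s : List Char) : ∀ p ∈ pvSplit c s, c ∉ p := by
  induction s with
  | nil => intro p hp; simp [pvSplit] at hp; simp [hp]
  | cons x xs ih =>
    intro p hp
    by_cases h : x = c
    · simp only [pvSplit, if_pos h] at hp
      rcases List.mem_cons.mp hp with hp | hp
      · simp [hp]
      · exact ih p hp
    · simp only [pvSplit, if_neg h] at hp
      cases heq : pvSplit c xs with
      | nil => exact absurd heq (pvSplit_ne_nil c xs)
      | cons a t =>
        rw [heq, List.modifyHead_cons] at hp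
        rcases List.mem_cons.mp hp with hp | hp
        · subst hp
          intro hc
          rcases List.mem_cons.mp hc with hc | hc
          · exact h hc.symm
          · exact ih a (by rw [heq]; exact List.mem_cons_self) hc
        · exact ih p (by rw [heq]; exact List.mem_cons_of_mem _ hp)

lemma pvSplit_intercalate (c : Char) (s : List Char) :
    List.intercalate [c] (pvSplit c s) = s := by
  induction s with
  | nil => simp [pvSplit, pvInterc_singleton]
  | cons x xs ih =>
    by_cases h : x = c
    · subst h
      rw [show pvSplit x (x :: xs) = [] :: pvSplit x xs from by simp [pvSplit]]
      rw [pvInterc_cons x [] _ (pvSplit_ne_nil _ _), ih, List.nil_append]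
    · simp only [pvSplit, if_neg h]
      cases heq : pvSplit c xs with
      | nil => exact absurd heq (pvSplit_ne_nil c xs)
      | cons a t =>
        rw [heq] at ih
        rw [List.modifyHead_cons]
        cases t with
        | nil =>
          rw [pvInterc_singleton] at ih
          rw [pvInterc_singleton, ih]
        | cons b u =>
          rw [pvInterc_cons c a (b :: u) (by simp)] at ih
          rw [pvInterc_cons c (x :: a) (b :: u) (by simp), List.cons_append, ih]

lemma pvSplitOn_go_eq (c : Char) : ∀ (fuel : Nat) (l cur : List Char) (acc : List (List Char)),
    l.length < fuel →
    PySem.Chars.splitOn.go [c] fuel l cur acc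
      = acc.reverse ++ (pvSplit c l).modifyHead (cur.reverse ++ ·) := by
  intro fuel
  induction fuel with
  | zero => intro l cur acc h; omega
  | succ f ih =>
    intro l cur acc h
    cases l with
    | nil =>
      rw [PySem.Chars.splitOn.go]
      · simp [pvSplit]
      · omega
    | cons x rest =>
      rw [PySem.Chars.splitOn.go]
      by_cases hx : x = c
      · rw [if_pos (by simp [List.isPrefixOf, hx])]
        simp only [List.length_cons, List.length_nil, List.drop_succ_cons, List.drop_zero]
        rw [ih rest [] _ (by simpa using h)]
        rw [show pvSplit c (x :: rest) = [] :: pvSplit c rest from by simp [pvSplit, hx]]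
        cases heq : pvSplit c rest with
        | nil => exact absurd heq (pvSplit_ne_nil c rest)
        | cons a t2 => simp
      · rw [if_neg (by simp [List.isPrefixOf]; exact fun hh => hx hh.symm)]
        rw [ih rest (x :: cur) acc (by simpa using h)]
        simp only [pvSplit, if_neg hx]
        cases heq : pvSplit c rest with
        | nil => exact absurd heq (pvSplit_ne_nil c rest)
        | cons a t => simp

lemma pvSplitOn_eq_pvSplit (c : Char) (s : List Char) :
    PySem.Chars.splitOn s [c] = pvSplit c s := by
  unfold PySem.Chars.splitOn
  rw [pvSplitOn_go_eq c (s.length + 1) s [] [] (by omega)]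
  cases heq : pvSplit c s with
  | nil => exact absurd heq (pvSplit_ne_nil c s)
  | cons a t => simp [heq]

-- ---- first line containing a marker ----
def pvFirst (m : List Char) : List (List Char) → Option Nat
  | [] => none
  | l :: t => if PySem.Chars.isIn m l then some 0 else (pvFirst m t).map (· + 1)

lemma pvFirst_cons_neg {m l : List Char} {t : List (List Char)}
    (h : PySem.Chars.isIn m l = false) :
    pvFirst m (l :: t) = (pvFirst m t).map (· + 1) := by
  simp only [pvFirst, h, Bool.false_eq_true, if_false]

lemma pvFindMarker_eq_pvFirst (m : String) : ∀ (L : List (List Char)) (i : Nat),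
    pvFindMarker m L i = (pvFirst m.toList L).map (· + i) := by
  intro L
  induction L with
  | nil => intro i; rfl
  | cons l t ih =>
    intro i
    by_cases h : PySem.Chars.isIn m.toList l = true
    · simp [pvFindMarker, pvFirst, h]
    · simp only [pvFindMarker, pvFirst, h, Bool.false_eq_true, if_false]
      rw [ih (i + 1)]
      cases pvFirst m.toList t with
      | none => simp
      | some k => simp; omega

lemma pvFirst_some {m : List Char} : ∀ {L : List (List Char)} {i : Nat},
    pvFirst m L = some i → i < L.length ∧ PySem.Chars.isIn m (L.getD i []) = true := by
  intro L
  induction L with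
  | nil => intro i h; simp [pvFirst] at h
  | cons l t ih =>
    intro i h
    by_cases hl : PySem.Chars.isIn m l = true
    · simp [pvFirst, hl] at h
      subst h; simpa
    · simp only [pvFirst, hl, Bool.false_eq_true, if_false, Option.map_eq_some_iff] at h
      obtain ⟨j, hj, rfl⟩ := h
      obtain ⟨h1, h2⟩ := ih hj
      exact ⟨by simpa using h1, by simpa using h2⟩

-- ---- character offsets of line starts ----
def pvOff (L : List (List Char)) (a : Nat) : Nat := ((L.take a).map (fun l => l.length + 1)).sum

lemma pvOff_cons_succ (l : List Char) (t : List (List Char)) (a : Nat) :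
    pvOff (l :: t) (a + 1) = l.length + 1 + pvOff t a := by
  simp [pvOff]

lemma pvOff_ge (L : List (List Char)) : ∀ (a : Nat), a ≤ L.length → a ≤ pvOff L a := by
  induction L with
  | nil => intro a ha; simp at ha; simp [ha, pvOff]
  | cons l t ih =>
    intro a ha
    cases a with
    | zero => simp
    | succ a =>
      rw [pvOff_cons_succ]
      have := ih a (by simpa using ha)
      omega

lemma pvOff_add (L : List (List Char)) {a b : Nat} (h : a ≤ b) :
    pvOff L b = pvOff L a + pvOff (L.drop a) (b - a) := by
  obtain ⟨k, rfl⟩ : ∃ k, b = a + k := ⟨b - a, by omega⟩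
  simp only [Nat.add_sub_cancel_left]
  rw [pvOff, List.take_add, List.map_append, List.sum_append]
  rfl

lemma pvOff_mono (L : List (List Char)) {a b : Nat} (h : a ≤ b) : pvOff L a ≤ pvOff L b := by
  rw [pvOff_add L h]; omega

lemma pvOff_succ (L : List (List Char)) {i : Nat} (h : i < L.length) :
    pvOff L (i + 1) = pvOff L i + (L.getD i []).length + 1 := by
  rw [pvOff, List.take_add_one, List.map_append, List.sum_append, List.getElem?_eq_getElem h,
    List.getD_eq_getElem L [] h]
  simp [pvOff]; omega

lemma pvLen_intercalate (c : Char) : ∀ (L : List (List Char)), L ≠ [] →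
    (List.intercalate [c] L).length + 1 = pvOff L L.length := by
  intro L
  induction L with
  | nil => intro h; cases h rfl
  | cons w t ih =>
    intro _
    cases t with
    | nil => simp [pvInterc_singleton, pvOff]
    | cons b u =>
      rw [pvInterc_cons c w _ (by simp)]
      have := ih (by simp)
      rw [List.length_append, List.length_cons,
        show ((w :: b :: u : List (List Char))).length = (b :: u).length + 1 from rfl, pvOff_cons_succ]
      omega

lemma pvDrop_intercalate (c : Char) : ∀ (L : List (List Char)) (a : Nat), a ≤ L.length →
    (List.intercalate [c] L).drop (pvOff L a) = List.intercalate [c] (L.drop a) := by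
  intro L
  induction L with
  | nil => intro a ha; simp at ha; simp [ha, pvOff, pvInterc_nil]
  | cons w t ih =>
    intro a ha
    cases a with
    | zero => simp [pvOff]
    | succ a =>
      rw [pvOff_cons_succ]
      cases t with
      | nil =>
        have ha0 : a = 0 := by simpa using ha
        subst ha0
        simp [pvInterc_singleton, pvOff, pvInterc_nil, List.drop_eq_nil_of_le]
      | cons b u =>
        rw [pvInterc_cons c w (b :: u) (by simp)]
        rw [show w ++ c :: List.intercalate [c] (b :: u) = (w ++ [c]) ++ List.intercalate [c] (b :: u) by simp]
        rw [show w.length + 1 + pvOff (b :: u) a = (w ++ [c]).length + pvOff (b :: u) a by simp]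
        rw [List.drop_length_add_append]
        exact ih a (by simpa using ha)

lemma pvTake_intercalate (c : Char) : ∀ (L : List (List Char)) (b : Nat), 1 ≤ b → b ≤ L.length →
    (List.intercalate [c] L).take (pvOff L b - 1) = List.intercalate [c] (L.take b) := by
  intro L
  induction L with
  | nil => intro b h1 h2; simp at h2; omega
  | cons w t ih =>
    intro b hb1 hbl
    cases b with
    | zero => omega
    | succ b =>
      cases b with
      | zero =>
        rw [pvOff_cons_succ]
        simp only [pvOff, List.take_zero, List.map_nil, List.sum_nil, Nat.add_zero, Nat.add_sub_cancel]
        cases t with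
        | nil => simp [pvInterc_singleton]
        | cons bb u =>
          rw [pvInterc_cons c w (bb :: u) (by simp)]
          rw [List.take_append_of_le_length (le_refl w.length), List.take_length]
          simp [pvInterc_singleton]
      | succ b =>
        cases t with
        | nil => simp at hbl
        | cons bb u =>
          rw [pvInterc_cons c w (bb :: u) (by simp), pvOff_cons_succ]
          have hge : 1 ≤ pvOff (bb :: u) (b + 1) :=
            le_trans (by omega) (pvOff_ge (bb :: u) (b + 1) (by simpa using hbl))
          rw [show w.length + 1 + pvOff (bb :: u) (b + 1) - 1 = (w ++ [c]).length + (pvOff (bb :: u) (b + 1) - 1) by simp; omega]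
          rw [show w ++ c :: List.intercalate [c] (bb :: u) = (w ++ [c]) ++ List.intercalate [c] (bb :: u) by simp]
          rw [List.take_length_add_append]
          rw [ih (b + 1) (by omega) (by simpa using hbl)]
          rw [show List.take (b + 1 + 1) (w :: bb :: u) = w :: List.take (b + 1) (bb :: u) from rfl]
          rw [pvInterc_cons c w ((bb :: u).take (b + 1)) (by simp)]
          simp

lemma pvTake_intercalate_mid (c : Char) : ∀ (L : List (List Char)) (j k : Nat),
    j < L.length → k ≤ (L.getD j []).length →
    (List.intercalate [c] L).take (pvOff L j + k)
      = List.intercalate [c] (L.take j ++ [(L.getD j []).take k]) := by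
  intro L
  induction L with
  | nil => intro j k hj; simp at hj
  | cons w t ih =>
    intro j k hj hk
    cases j with
    | zero =>
      simp only [List.getD_cons_zero] at hk
      simp only [pvOff, List.take_zero, List.map_nil, List.sum_nil, Nat.zero_add,
        List.getD_cons_zero, List.nil_append]
      rw [pvInterc_singleton]
      cases t with
      | nil => rw [pvInterc_singleton]
      | cons b u =>
        rw [pvInterc_cons c w (b :: u) (by simp)]
        exact List.take_append_of_le_length hk
    | succ j =>
      have hj' : j < t.length := by simpa using hj
      have ht : t ≠ [] := by intro hteq; rw [hteq] at hj'; simp at hj'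
      have hk' : k ≤ (t.getD j []).length := by simpa using hk
      rw [pvInterc_cons c w t ht, pvOff_cons_succ]
      rw [show w.length + 1 + pvOff t j + k = (w ++ [c]).length + (pvOff t j + k) by simp; omega]
      rw [show w ++ c :: List.intercalate [c] t = (w ++ [c]) ++ List.intercalate [c] t by simp]
      rw [List.take_length_add_append, ih j k hj' hk']
      rw [List.take_succ_cons, List.getD_cons_succ, List.cons_append]
      rw [pvInterc_cons c w (t.take j ++ [(t.getD j []).take k]) (by simp)]
      simp

lemma pvIntercalate_append_singleton (c : Char) : ∀ (u : List (List Char)) (w : List Char), u ≠ [] →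
    List.intercalate [c] (u ++ [w]) = List.intercalate [c] u ++ c :: w := by
  intro u
  induction u with
  | nil => intro w h; cases h rfl
  | cons x v ih =>
    intro w _
    cases v with
    | nil =>
      rw [pvInterc_singleton, List.singleton_append, pvInterc_cons c x [w] (by simp), pvInterc_singleton]
    | cons y z =>
      rw [List.cons_append, pvInterc_cons c x ((y :: z) ++ [w]) (by simp),
        pvInterc_cons c x (y :: z) (by simp), ih w (by simp)]
      simp

-- ---- prefixes across a separator ----
lemma pvPrefix_escape {c : Char} {m u v : List Char} (hc : c ∉ m)
    (h : m <+: u ++ c :: v) : m <+: u := by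
  by_cases hlen : m.length ≤ u.length
  · exact List.prefix_of_prefix_length_le h (List.prefix_append u (c :: v)) hlen
  · exfalso
    have h2 : (u ++ [c]) <+: u ++ c :: v := ⟨v, by simp⟩
    have h3 : (u ++ [c]) <+: m := List.prefix_of_prefix_length_le h2 h (by simp; omega)
    exact hc (h3.subset (by simp))

lemma pvNoSepPrefix {c : Char} {w : List Char} (h : c ∉ w) (i : Nat) : ¬ [c] <+: w.drop i := by
  intro hp
  obtain ⟨r, hr⟩ := hp
  have : c ∈ w.drop i := by rw [← hr]; simp
  exact h (List.mem_of_mem_drop this)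

-- ---- find: characterisation, uniqueness and append laws ----
lemma pvFind_spec {s m : List Char} (h : m <:+: s) :
    m <+: s.drop (PySem.Chars.find s m).toNat ∧
      ∀ i < (PySem.Chars.find s m).toNat, ¬ m <+: s.drop i := by
  have hne : PySem.Chars.find s m ≠ -1 := (PySem.Chars.find_ne_neg_one_iff s m).mpr h
  have spec := PySem.Chars.findFrom_natCast_spec s m 0 (Nat.zero_le _)
  rw [Nat.cast_zero, PySem.Chars.findFrom_zero] at spec
  obtain ⟨-, h1, h2⟩ := spec hne
  exact ⟨h1, fun i hi => h2 i (Nat.zero_le _) hi⟩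

lemma pvFind_eq_of {s m : List Char} {j : Nat} (h1 : m <+: s.drop j)
    (h2 : ∀ i < j, ¬ m <+: s.drop i) : PySem.Chars.find s m = j := by
  have hinfix : m <:+: s := h1.isInfix.trans (List.drop_suffix j s).isInfix
  have hnn : 0 ≤ PySem.Chars.find s m := (PySem.Chars.find_nonneg_iff s m).mpr hinfix
  obtain ⟨hpre, hmin⟩ := pvFind_spec hinfix
  rcases lt_trichotomy (PySem.Chars.find s m).toNat j with hlt | heq | hgt
  · exact absurd hpre (h2 _ hlt)
  · omega
  · exact absurd h1 (hmin j hgt)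

lemma pvFind_nil {m : List Char} (h : m ≠ []) : PySem.Chars.find [] m = -1 := by
  rw [PySem.Chars.find_eq_neg_one_iff]
  intro hi
  exact h (List.eq_nil_of_infix_nil hi)

lemma pvFind_no_sep {c : Char} {l : List Char} (h : c ∉ l) :
    PySem.Chars.find l [c] = -1 := by
  rw [PySem.Chars.find_eq_neg_one_iff]
  intro hi
  exact h (List.mem_of_cons_sublist hi.sublist)

lemma pvFind_sep {c : Char} {l : List Char} (t : List Char) (h : c ∉ l) :
    PySem.Chars.find (l ++ c :: t) [c] = l.length := by
  apply pvFind_eq_of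
  · rw [List.drop_left]
    exact ⟨t, rfl⟩
  · intro i hi
    rw [List.drop_append_of_le_length hi.le]
    intro hp
    cases heq : l.drop i with
    | nil => have := List.drop_eq_nil_iff.mp heq; omega
    | cons a s' =>
      rw [heq, List.cons_append] at hp
      obtain ⟨r, hr⟩ := hp
      have hca : c = a := by have := congrArg List.head? hr; simpa using this
      apply h
      have ha : a ∈ l := List.mem_of_mem_drop (heq ▸ List.mem_cons_self)
      rwa [hca]

lemma pvDrop_beyond {c : Char} (l t : List Char) (j : Nat) (hj : l.length < j) :
    (l ++ c :: t).drop j = t.drop (j - l.length - 1) := by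
  obtain ⟨k, rfl⟩ : ∃ k, j = (l.length + 1) + k := ⟨j - l.length - 1, by omega⟩
  rw [show l ++ c :: t = (l ++ [c]) ++ t by simp,
    show l.length + 1 + k = (l ++ [c]).length + k by simp, List.drop_length_add_append]
  rw [show (l ++ [c]).length + k - l.length - 1 = k from by simp; omega]

lemma pvFind_append_sep {c : Char} {m l : List Char} (t : List Char)
    (hm : c ∉ m) (hm0 : m ≠ []) (hl : c ∉ l) :
    PySem.Chars.find (l ++ c :: t) m
      = if PySem.Chars.isIn m l then PySem.Chars.find l m
        else if PySem.Chars.find t m = -1 then -1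
        else (l.length + 1 : Int) + PySem.Chars.find t m := by
  by_cases hin : PySem.Chars.isIn m l = true
  · rw [if_pos hin]
    have hinf := (PySem.Chars.isIn_iff_infix m l).mp hin
    have hnn : 0 ≤ PySem.Chars.find l m := (PySem.Chars.find_nonneg_iff l m).mpr hinf
    obtain ⟨hpre, hmin⟩ := pvFind_spec hinf
    have hfl : (PySem.Chars.find l m).toNat ≤ l.length := by
      have := PySem.Chars.find_le_length l m; omega
    have heq : PySem.Chars.find (l ++ c :: t) m = ((PySem.Chars.find l m).toNat : Int) := by
      apply pvFind_eq_of
      · rw [List.drop_append_of_le_length hfl]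
        exact hpre.trans (List.prefix_append _ _)
      · intro i hif hp
        rw [List.drop_append_of_le_length (by omega)] at hp
        exact hmin i hif (pvPrefix_escape hm hp)
    rw [heq, Int.toNat_of_nonneg hnn]
  · rw [if_neg hin]
    have hninf : ¬ m <:+: l := fun hh => hin ((PySem.Chars.isIn_iff_infix m l).mpr hh)
    by_cases ht : PySem.Chars.find t m = -1
    · rw [if_pos ht, PySem.Chars.find_eq_neg_one_iff]
      intro hinf
      obtain ⟨j, hj⟩ := (PySem.Chars.exists_prefix_drop_iff_isIn m (l ++ c :: t)).mpr
        ((PySem.Chars.isIn_iff_infix m (l ++ c :: t)).mpr hinf)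
      by_cases hjl : j ≤ l.length
      · rw [List.drop_append_of_le_length hjl] at hj
        exact hninf ((pvPrefix_escape hm hj).isInfix.trans (List.drop_suffix j l).isInfix)
      · rw [pvDrop_beyond l t j (by omega)] at hj
        have : m <:+: t := hj.isInfix.trans (List.drop_suffix _ t).isInfix
        rw [PySem.Chars.find_eq_neg_one_iff] at ht
        exact ht this
    · rw [if_neg ht]
      have hinf_t : m <:+: t := by
        by_contra hcon
        exact ht ((PySem.Chars.find_eq_neg_one_iff t m).mpr hcon)
      have hnn : 0 ≤ PySem.Chars.find t m := (PySem.Chars.find_nonneg_iff t m).mpr hinf_t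
      obtain ⟨hpre, hmin⟩ := pvFind_spec hinf_t
      have heq : PySem.Chars.find (l ++ c :: t) m
          = ((l.length + 1 + (PySem.Chars.find t m).toNat : Nat) : Int) := by
        apply pvFind_eq_of
        · rw [pvDrop_beyond l t _ (by omega),
            show l.length + 1 + (PySem.Chars.find t m).toNat - l.length - 1
              = (PySem.Chars.find t m).toNat from by omega]
          exact hpre
        · intro i hi hp
          by_cases hil : i ≤ l.length
          · rw [List.drop_append_of_le_length hil] at hp
            exact hninf ((pvPrefix_escape hm hp).isInfix.trans (List.drop_suffix i l).isInfix)
          · rw [pvDrop_beyond l t i (by omega)] at hp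
            exact hmin _ (by omega) hp
      rw [heq]
      push_cast [Int.toNat_of_nonneg hnn]
      ring

lemma pvFind_intercalate {c : Char} {m : List Char} (hm : c ∉ m) (hm0 : m ≠ []) :
    ∀ (L : List (List Char)), (∀ p ∈ L, c ∉ p) →
    PySem.Chars.find (List.intercalate [c] L) m
      = match pvFirst m L with
        | none => -1
        | some i => ((pvOff L i : Nat) : Int) + PySem.Chars.find (L.getD i []) m := by
  intro L
  induction L with
  | nil => intro _; simpa [pvInterc_nil, pvFirst] using pvFind_nil hm0
  | cons l t ih =>
    intro hfree
    have hcl : c ∉ l := hfree l List.mem_cons_self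
    by_cases hl : PySem.Chars.isIn m l = true
    · cases t with
      | nil => simp [pvInterc_singleton, pvFirst, hl, pvOff]
      | cons b u =>
        rw [pvInterc_cons c l (b :: u) (by simp), pvFind_append_sep _ hm hm0 hcl, if_pos hl]
        simp [pvFirst, hl, pvOff]
    · cases t with
      | nil =>
        rw [pvInterc_singleton]
        have hfl : PySem.Chars.find l m = -1 := by
          rw [PySem.Chars.find_eq_neg_one_iff]
          exact fun hh => hl ((PySem.Chars.isIn_iff_infix m l).mpr hh)
        simp [pvFirst, hl, hfl]
      | cons b u =>
        rw [pvInterc_cons c l (b :: u) (by simp), pvFind_append_sep _ hm hm0 hcl,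
          if_neg (by simp [hl])]
        have hl' : PySem.Chars.isIn m l = false := by simpa using hl
        have iht := ih (fun p hp => hfree p (List.mem_cons_of_mem _ hp))
        cases hf : pvFirst m (b :: u) with
        | none =>
          have iht' : PySem.Chars.find (List.intercalate [c] (b :: u)) m = -1 := by
            rw [hf] at iht; simpa using iht
          rw [if_pos iht', pvFirst_cons_neg hl', hf]
          simp
        | some i =>
          have iht' : PySem.Chars.find (List.intercalate [c] (b :: u)) m
              = ((pvOff (b :: u) i : Nat) : Int) + PySem.Chars.find ((b :: u).getD i []) m := by
            rw [hf] at iht; simpa using iht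
          obtain ⟨hilen, hiin⟩ := pvFirst_some hf
          have hfnn : 0 ≤ PySem.Chars.find ((b :: u).getD i []) m :=
            (PySem.Chars.find_nonneg_iff _ m).mpr ((PySem.Chars.isIn_iff_infix _ _).mp hiin)
          rw [if_neg (by
            rw [iht']
            intro hcon
            have h0 : (0:Int) ≤ ((pvOff (b :: u) i : Nat) : Int) := by positivity
            linarith)]
          rw [iht', pvFirst_cons_neg hl', hf]
          simp only [Option.map_some]
          show _ = ((pvOff (l :: b :: u) (i + 1) : Nat) : Int)
            + PySem.Chars.find ((l :: b :: u).getD (i + 1) []) m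
          rw [List.getD_cons_succ, pvOff_cons_succ]
          push_cast
          ring

-- ---- rfind ----
lemma pvRfind_go_eq_of {s m : List Char} {j : Nat} : ∀ (t : Nat), j ≤ t →
    m <+: s.drop j → (∀ i, j < i → i ≤ t → ¬ m <+: s.drop i) →
    PySem.Chars.rfind.go s m t = j := by
  intro t
  induction t with
  | zero =>
    intro h0 hp _
    have hj : j = 0 := by omega
    subst hj
    rw [PySem.Chars.rfind.go, if_pos (List.isPrefixOf_iff_prefix.mpr (by simpa using hp))]
    simp
  | succ t ih =>
    intro hjt hp habove
    rcases eq_or_lt_of_le hjt with heq | hlt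
    · subst heq
      rw [PySem.Chars.rfind.go, if_pos (List.isPrefixOf_iff_prefix.mpr hp)]
    · have ht1 : ¬ m <+: s.drop (t + 1) := habove (t + 1) (by omega) (le_refl _)
      rw [PySem.Chars.rfind.go, if_neg (by rw [List.isPrefixOf_iff_prefix]; exact ht1)]
      exact ih (by omega) hp (fun i h1 h2 => habove i h1 (by omega))

lemma pvRfind_go_neg_one {s m : List Char} : ∀ (t : Nat), (∀ i, i ≤ t → ¬ m <+: s.drop i) →
    PySem.Chars.rfind.go s m t = -1 := by
  intro t
  induction t with
  | zero =>
    intro h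
    rw [PySem.Chars.rfind.go, if_neg (by rw [List.isPrefixOf_iff_prefix]; simpa using h 0 (le_refl _))]
  | succ t ih =>
    intro h
    rw [PySem.Chars.rfind.go, if_neg (by rw [List.isPrefixOf_iff_prefix]; exact h (t + 1) (le_refl _))]
    exact ih (fun i hi => h i (by omega))

lemma pvRfind_no_sep {c : Char} {w : List Char} (h : c ∉ w) :
    PySem.Chars.rfind w [c] = -1 := by
  unfold PySem.Chars.rfind
  exact pvRfind_go_neg_one _ (fun i _ => pvNoSepPrefix h i)

lemma pvRfind_append_sep {c : Char} {w : List Char} (u : List Char) (h : c ∉ w) :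
    PySem.Chars.rfind (u ++ c :: w) [c] = u.length := by
  unfold PySem.Chars.rfind
  apply pvRfind_go_eq_of
  · simp
  · rw [List.drop_left]
    exact ⟨w, rfl⟩
  · intro i h1 h2 hp
    rw [pvDrop_beyond u w i h1] at hp
    exact pvNoSepPrefix h _ hp

-- ---- building blocks for the main correspondence ----
lemma pvDropAdd {α : Type} (l : List α) (a b : Nat) : l.drop (a + b) = (l.drop a).drop b := by
  rw [List.drop_drop]

lemma pvGetD_mem {L : List (List Char)} {i : Nat} (h : i < L.length) : L.getD i [] ∈ L := by
  rw [List.getD_eq_getElem L [] h]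
  exact List.getElem_mem h

lemma pvDrop_line (L : List (List Char)) (i pi : Nat) (hi : i < L.length)
    (hpi : pi ≤ (L.getD i []).length) :
    (List.intercalate ['\n'] L).drop (pvOff L i + pi)
      = (L.getD i []).drop pi
        ++ (if i + 1 = L.length then [] else '\n' :: List.intercalate ['\n'] (L.drop (i + 1))) := by
  rw [pvDropAdd, pvDrop_intercalate '\n' L i hi.le]
  have h1 : L.drop i = (L.getD i []) :: L.drop (i + 1) := by
    rw [List.getD_eq_getElem L [] hi]
    exact List.drop_eq_getElem_cons hi
  rw [h1]
  by_cases hl : i + 1 = L.length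
  · rw [if_pos hl]
    have h2 : L.drop (i + 1) = [] := by rw [hl]; exact List.drop_length
    rw [h2, pvInterc_singleton]
    simp
  · rw [if_neg hl]
    have h2 : L.drop (i + 1) ≠ [] := by
      rw [Ne, List.drop_eq_nil_iff]
      omega
    rw [pvInterc_cons '\n' _ _ h2, List.drop_append_of_le_length hpi]

lemma pvInterTake_len (L : List (List Char)) (j : Nat) (hne : L ≠ []) (hj1 : 1 ≤ j)
    (hj : j ≤ L.length) :
    (List.intercalate ['\n'] (L.take j)).length + 1 = pvOff L j := by
  have h := pvLen_intercalate '\n' (L.take j) (by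
    rw [Ne, List.take_eq_nil_iff]
    push_neg
    exact ⟨by omega, hne⟩)
  rw [List.length_take, min_eq_left hj] at h
  rw [h, pvOff, pvOff, List.take_take, min_self]

lemma pvRfind_take (L : List (List Char)) (j qj : Nat) (hfree : ∀ p ∈ L, '\n' ∉ p)
    (hne : L ≠ []) (hj : j < L.length) (hqj : qj ≤ (L.getD j []).length) :
    PySem.Chars.rfind ((List.intercalate ['\n'] L).take (pvOff L j + qj)) ['\n']
      = if j = 0 then -1 else ((pvOff L j - 1 : Nat) : Int) := by
  have hwfree : '\n' ∉ (L.getD j []).take qj :=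
    fun hmem => hfree _ (pvGetD_mem hj) (List.mem_of_mem_take hmem)
  rw [pvTake_intercalate_mid '\n' L j qj hj hqj]
  cases j with
  | zero =>
    rw [if_pos rfl]
    rw [show List.take 0 L ++ [(L.getD 0 []).take qj] = [(L.getD 0 []).take qj] from by simp]
    rw [pvInterc_singleton]
    exact pvRfind_no_sep hwfree
  | succ j' =>
    rw [if_neg (by omega)]
    have htne : L.take (j' + 1) ≠ [] := by
      rw [Ne, List.take_eq_nil_iff]
      push_neg
      exact ⟨by omega, hne⟩
    rw [pvIntercalate_append_singleton '\n' (L.take (j' + 1)) _ htne]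
    rw [pvRfind_append_sep _ hwfree]
    have hl := pvInterTake_len L (j' + 1) hne (by omega) hj.le
    congr 1
    omega

lemma pvFindFrom_line (L : List (List Char)) (i pi : Nat) (hfree : ∀ p ∈ L, '\n' ∉ p)
    (hne : L ≠ []) (hi : i < L.length) (hpi : pi ≤ (L.getD i []).length) :
    PySem.Chars.findFrom (List.intercalate ['\n'] L) ['\n'] ((pvOff L i + pi : Nat) : Int)
      = if i + 1 = L.length then -1 else ((pvOff L (i + 1) - 1 : Nat) : Int) := by
  have hlen := pvLen_intercalate '\n' L hne
  have hsucc := pvOff_succ L hi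
  have hmono := pvOff_mono L (show i + 1 ≤ L.length by omega)
  have hk : pvOff L i + pi ≤ (List.intercalate ['\n'] L).length := by omega
  rw [PySem.Chars.findFrom_natCast _ _ _ hk, pvDrop_line L i pi hi hpi]
  have hdfree : '\n' ∉ (L.getD i []).drop pi :=
    fun hmem => hfree _ (pvGetD_mem hi) (List.mem_of_mem_drop hmem)
  by_cases hlast : i + 1 = L.length
  · rw [if_pos hlast, if_pos hlast, List.append_nil, pvFind_no_sep hdfree, if_pos rfl]
  · rw [if_neg hlast, if_neg hlast, pvFind_sep _ hdfree, List.length_drop]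
    rw [if_neg (by omega)]
    omega

lemma pvRfindFrom_zero (s sub : List Char) (q : Nat) (hq : q ≤ s.length) :
    PySem.Chars.rfindFrom s sub 0 (some (q : Int)) = PySem.Chars.rfind (s.take q) sub := by
  simp only [PySem.Chars.rfindFrom]
  rw [if_neg (show ¬ ((s.length : Int) < (q : Int)) from by exact_mod_cast Nat.not_lt.mpr hq)]
  rw [if_neg (show ¬ ((q : Int) < 0) from by omega)]
  rw [if_neg (show ¬ ((0 : Int) < 0) from by norm_num)]
  rw [if_neg (show ¬ ((q : Int) < 0) from by omega)]
  simp only [Int.toNat_natCast, Int.toNat_zero, List.drop_zero, zero_add]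
  by_cases hr : PySem.Chars.rfind (List.take q s) sub = -1
  · rw [if_pos hr, hr]
  · rw [if_neg hr]

-- ---- main correspondence on the line decomposition ----
lemma pvMain (s : String) (L : List (List Char)) (hne : L ≠ []) (hfree : ∀ p ∈ L, '\n' ∉ p)
    (hL : PySem.Chars.splitOn s.toList "\n".toList = L)
    (hs : s.toList = List.intercalate ['\n'] L) :
    trim_test_lines s = trim_test_lines_alt s := by
  have hm1c : '\n' ∉ pvStartMarker.toList := by decide
  have hm2c : '\n' ∉ pvEndMarker.toList := by decide
  have hm1n : pvStartMarker.toList ≠ [] := by decide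
  have hm2n : pvEndMarker.toList ≠ [] := by decide
  unfold trim_test_lines trim_test_lines_alt
  rw [hL, hs, show "\n".toList = ['\n'] from by decide]
  simp only [PySem.Chars.join]
  rw [pvFindMarker_eq_pvFirst, pvFindMarker_eq_pvFirst]
  have hf1 := pvFind_intercalate hm1c hm1n L hfree
  have hf2 := pvFind_intercalate hm2c hm2n L hfree
  have hlen := pvLen_intercalate '\n' L hne
  have hnne : 1 ≤ L.length := by
    cases L
    · cases hne rfl
    · simp
  cases h1 : pvFirst pvStartMarker.toList L with
  | none =>
    have hf1' : PySem.Chars.find (List.intercalate ['\n'] L) pvStartMarker.toList = -1 := by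
      rw [h1] at hf1
      exact hf1
    cases h2 : pvFirst pvEndMarker.toList L with
    | none =>
      have hf2' : PySem.Chars.find (List.intercalate ['\n'] L) pvEndMarker.toList = -1 := by
        rw [h2] at hf2
        exact hf2
      simp only [h1, h2, Option.map_none, hf1', hf2', bne_self_eq_false, Bool.false_eq_true,
        if_false]
      rw [PySem.List.slice_zero_start, PySem.List.slice_to_natCast, List.take_length]
    | some j =>
      obtain ⟨hjlen, hjin⟩ := pvFirst_some h2
      have hqnn : 0 ≤ PySem.Chars.find (L.getD j []) pvEndMarker.toList :=
        (PySem.Chars.find_nonneg_iff _ _).mpr ((PySem.Chars.isIn_iff_infix _ _).mp hjin)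
      have hqjle : (PySem.Chars.find (L.getD j []) pvEndMarker.toList).toNat
          ≤ (L.getD j []).length := by
        have := PySem.Chars.find_le_length (L.getD j []) pvEndMarker.toList
        omega
      have hf2' : PySem.Chars.find (List.intercalate ['\n'] L) pvEndMarker.toList
          = ((pvOff L j + (PySem.Chars.find (L.getD j []) pvEndMarker.toList).toNat : Nat) : Int) := by
        rw [h2] at hf2
        rw [hf2]
        push_cast [Int.toNat_of_nonneg hqnn]
        ring
      have hqle : pvOff L j + (PySem.Chars.find (L.getD j []) pvEndMarker.toList).toNat
          ≤ (List.intercalate ['\n'] L).length := by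
        have hfl := PySem.Chars.find_le_length (List.intercalate ['\n'] L) pvEndMarker.toList
        rw [hf2'] at hfl
        exact_mod_cast hfl
      have hrfv : PySem.Chars.rfindFrom (List.intercalate ['\n'] L) ['\n'] 0
          (some ((pvOff L j + (PySem.Chars.find (L.getD j []) pvEndMarker.toList).toNat : Nat) : Int))
          = if j = 0 then -1 else ((pvOff L j - 1 : Nat) : Int) := by
        rw [pvRfindFrom_zero _ _ _ hqle, pvRfind_take L j _ hfree hne hjlen hqjle]
      have hb2 : ((((pvOff L j + (PySem.Chars.find (L.getD j []) pvEndMarker.toList).toNat : Nat)) : Int) != -1) = true :=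
        bne_iff_ne.mpr (by omega)
      cases j with
      | zero =>
        rw [if_pos rfl] at hrfv
        simp only [h1, h2, Option.map_none, Option.map_some, Nat.add_zero, hf1', hf2',
          bne_self_eq_false, Bool.false_eq_true, if_false, hb2, if_true, hrfv]
        rw [show max (-1 : Int) 0 = ((0 : Nat) : Int) from by norm_num]
        rw [PySem.List.slice_to_natCast, List.take_zero, pvInterc_nil]
        rw [show (0 : Int) = ((0 : Nat) : Int) from rfl, PySem.List.slice_natCast]
        simp
      | succ j' =>
        rw [if_neg (by omega)] at hrfv
        simp only [h1, h2, Option.map_none, Option.map_some, Nat.add_zero, hf1', hf2',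
          bne_self_eq_false, Bool.false_eq_true, if_false, hb2, if_true, hrfv]
        rw [show max (((pvOff L (j' + 1) - 1 : Nat)) : Int) 0 = ((pvOff L (j' + 1) - 1 : Nat) : Int) from
          max_eq_left (by omega)]
        rw [PySem.List.slice_to_natCast, PySem.List.slice_zero_start, PySem.List.slice_to_natCast]
        rw [pvTake_intercalate '\n' L (j' + 1) (by omega) hjlen.le]
  | some i =>
    obtain ⟨hilen, hiin⟩ := pvFirst_some h1
    have hpnn : 0 ≤ PySem.Chars.find (L.getD i []) pvStartMarker.toList :=
      (PySem.Chars.find_nonneg_iff _ _).mpr ((PySem.Chars.isIn_iff_infix _ _).mp hiin)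
    have hpile : (PySem.Chars.find (L.getD i []) pvStartMarker.toList).toNat
        ≤ (L.getD i []).length := by
      have := PySem.Chars.find_le_length (L.getD i []) pvStartMarker.toList
      omega
    have hf1' : PySem.Chars.find (List.intercalate ['\n'] L) pvStartMarker.toList
        = ((pvOff L i + (PySem.Chars.find (L.getD i []) pvStartMarker.toList).toNat : Nat) : Int) := by
      rw [h1] at hf1
      rw [hf1]
      push_cast [Int.toNat_of_nonneg hpnn]
      ring
    have hffv := pvFindFrom_line L i (PySem.Chars.find (L.getD i []) pvStartMarker.toList).toNat
      hfree hne hilen hpile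
    have hb1 : ((((pvOff L i + (PySem.Chars.find (L.getD i []) pvStartMarker.toList).toNat : Nat)) : Int) != -1) = true :=
      bne_iff_ne.mpr (by omega)
    cases h2 : pvFirst pvEndMarker.toList L with
    | none =>
      have hf2' : PySem.Chars.find (List.intercalate ['\n'] L) pvEndMarker.toList = -1 := by
        rw [h2] at hf2
        exact hf2
      by_cases hlast : i + 1 = L.length
      · rw [if_pos hlast] at hffv
        simp only [h1, h2, Option.map_some, Option.map_none, Nat.add_zero, hf1', hf2', hffv,
          hb1, if_true, bne_self_eq_false, Bool.false_eq_true, if_false]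
        rw [PySem.List.slice_from_natCast,
          show L.drop (i + 1) = [] from by rw [hlast]; exact List.drop_length, pvInterc_nil]
        rw [PySem.List.slice_natCast, List.drop_length]
        simp
      · rw [if_neg hlast] at hffv
        have hb2 : ((((pvOff L (i + 1) - 1 : Nat)) : Int) != -1) = true := bne_iff_ne.mpr (by omega)
        simp only [h1, h2, Option.map_some, Option.map_none, Nat.add_zero, hf1', hf2', hffv,
          hb1, hb2, if_true, bne_self_eq_false, Bool.false_eq_true, if_false]
        rw [show (((pvOff L (i + 1) - 1 : Nat)) : Int) + 1 = ((pvOff L (i + 1) : Nat) : Int) from by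
          have := pvOff_ge L (i + 1) (by omega)
          omega]
        rw [PySem.List.slice_from_natCast, PySem.List.slice_natCast]
        rw [pvDrop_intercalate '\n' L (i + 1) (by omega)]
        have h3 := pvLen_intercalate '\n' (L.drop (i + 1)) (by rw [Ne, List.drop_eq_nil_iff]; omega)
        have h4 := pvOff_add L (show i + 1 ≤ L.length by omega)
        rw [List.length_drop] at h3
        rw [List.take_of_length_le (by omega)]
    | some j =>
      obtain ⟨hjlen, hjin⟩ := pvFirst_some h2
      have hqnn : 0 ≤ PySem.Chars.find (L.getD j []) pvEndMarker.toList :=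
        (PySem.Chars.find_nonneg_iff _ _).mpr ((PySem.Chars.isIn_iff_infix _ _).mp hjin)
      have hqjle : (PySem.Chars.find (L.getD j []) pvEndMarker.toList).toNat
          ≤ (L.getD j []).length := by
        have := PySem.Chars.find_le_length (L.getD j []) pvEndMarker.toList
        omega
      have hf2' : PySem.Chars.find (List.intercalate ['\n'] L) pvEndMarker.toList
          = ((pvOff L j + (PySem.Chars.find (L.getD j []) pvEndMarker.toList).toNat : Nat) : Int) := by
        rw [h2] at hf2
        rw [hf2]
        push_cast [Int.toNat_of_nonneg hqnn]
        ring
      have hqle : pvOff L j + (PySem.Chars.find (L.getD j []) pvEndMarker.toList).toNat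
          ≤ (List.intercalate ['\n'] L).length := by
        have hfl := PySem.Chars.find_le_length (List.intercalate ['\n'] L) pvEndMarker.toList
        rw [hf2'] at hfl
        exact_mod_cast hfl
      have hrfv : PySem.Chars.rfindFrom (List.intercalate ['\n'] L) ['\n'] 0
          (some ((pvOff L j + (PySem.Chars.find (L.getD j []) pvEndMarker.toList).toNat : Nat) : Int))
          = if j = 0 then -1 else ((pvOff L j - 1 : Nat) : Int) := by
        rw [pvRfindFrom_zero _ _ _ hqle, pvRfind_take L j _ hfree hne hjlen hqjle]
      have hb2 : ((((pvOff L j + (PySem.Chars.find (L.getD j []) pvEndMarker.toList).toNat : Nat)) : Int) != -1) = true :=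
        bne_iff_ne.mpr (by omega)
      by_cases hlast : i + 1 = L.length
      · rw [if_pos hlast] at hffv
        cases j with
        | zero =>
          rw [if_pos rfl] at hrfv
          simp only [h1, h2, Option.map_some, Nat.add_zero, hf1', hf2', hffv, hrfv, hb1, hb2,
            if_true, bne_self_eq_false, Bool.false_eq_true, if_false]
          rw [show max (-1 : Int) 0 = ((0 : Nat) : Int) from by norm_num]
          rw [PySem.List.slice_natCast, PySem.List.slice_natCast]
          simp [pvInterc_nil]
        | succ j' =>
          rw [if_neg (by omega)] at hrfv
          simp only [h1, h2, Option.map_some, Nat.add_zero, hf1', hf2', hffv, hrfv, hb1, hb2,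
            if_true, bne_self_eq_false, Bool.false_eq_true, if_false]
          rw [show max (((pvOff L (j' + 1) - 1 : Nat)) : Int) 0 = ((pvOff L (j' + 1) - 1 : Nat) : Int) from
            max_eq_left (by omega)]
          rw [PySem.List.slice_natCast, PySem.List.slice_natCast, List.drop_length]
          rw [show L.drop (i + 1) = [] from by rw [hlast]; exact List.drop_length]
          simp [pvInterc_nil]
      · rw [if_neg hlast] at hffv
        have hb3 : ((((pvOff L (i + 1) - 1 : Nat)) : Int) != -1) = true := bne_iff_ne.mpr (by omega)
        cases j with
        | zero =>
          rw [if_pos rfl] at hrfv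
          simp only [h1, h2, Option.map_some, Nat.add_zero, hf1', hf2', hffv, hrfv, hb1, hb2,
            hb3, if_true, bne_self_eq_false, Bool.false_eq_true, if_false]
          rw [show (((pvOff L (i + 1) - 1 : Nat)) : Int) + 1 = ((pvOff L (i + 1) : Nat) : Int) from by
            have := pvOff_ge L (i + 1) (by omega)
            omega]
          rw [show max (-1 : Int) 0 = ((0 : Nat) : Int) from by norm_num]
          rw [PySem.List.slice_natCast, PySem.List.slice_natCast]
          simp [pvInterc_nil]
        | succ j' =>
          rw [if_neg (by omega)] at hrfv
          simp only [h1, h2, Option.map_some, Nat.add_zero, hf1', hf2', hffv, hrfv, hb1, hb2,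
            hb3, if_true, bne_self_eq_false, Bool.false_eq_true, if_false]
          rw [show (((pvOff L (i + 1) - 1 : Nat)) : Int) + 1 = ((pvOff L (i + 1) : Nat) : Int) from by
            have := pvOff_ge L (i + 1) (by omega)
            omega]
          rw [show max (((pvOff L (j' + 1) - 1 : Nat)) : Int) 0 = ((pvOff L (j' + 1) - 1 : Nat) : Int) from
            max_eq_left (by omega)]
          rw [PySem.List.slice_natCast, PySem.List.slice_natCast]
          by_cases hji : j' + 1 ≤ i + 1
          · rw [show pvOff L (j' + 1) - 1 - pvOff L (i + 1) = 0 from by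
              have hmo := pvOff_mono L hji
              have hge := pvOff_ge L (j' + 1) hjlen.le
              omega]
            rw [show j' + 1 - (i + 1) = 0 from by omega]
            simp [pvInterc_nil]
          · rw [pvDrop_intercalate '\n' L (i + 1) (by omega)]
            rw [show pvOff L (j' + 1) - 1 - pvOff L (i + 1)
                = pvOff (L.drop (i + 1)) (j' + 1 - (i + 1)) - 1 from by
              have h4 := pvOff_add L (show i + 1 ≤ j' + 1 by omega)
              have h5 := pvOff_ge (L.drop (i + 1)) (j' + 1 - (i + 1)) (by
                rw [List.length_drop]
                omega)
              omega]
            rw [pvTake_intercalate '\n' (L.drop (i + 1)) (j' + 1 - (i + 1)) (by omega) (by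
              rw [List.length_drop]
              omega)]

-- ===== VERDICT (by name: the statement is the Claim_ definition above) =====
theorem trim_test_lines_spec : Claim_equal_trim_test_lines := by
  intro s _
  unfold Spec_trim_test_lines
  exact pvMain s (pvSplit '\n' s.toList) (pvSplit_ne_nil _ _) (pvSplit_sep_not_mem _ _)
    (by rw [show "\n".toList = ['\n'] from by decide]; exact pvSplitOn_eq_pvSplit '\n' s.toList)
    (pvSplit_intercalate '\n' s.toList).symm
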